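-- pv_equiv track=rewrite | github.com/DatouYangxu/python_coding_work | 根据氨基酸分子式计算其相对分子质量（假设只含COHNS五种元素）.py | molecularWeight
-- ===== SOURCE A (Python) =====
-- def molecularWeight(protein):
--     atom={'O':16,'C':12,'H':1,'N':14,'S':32}
--     shu=[str(i) for i in range(10)]
--     sum=0
--     for i in range(len(protein)):
--         if 'A'<=protein[i]<='Z':
--             if i== len(protein)-1:
--                 sum=sum+atom[protein[i]]
--             else:
--                 if protein[i+1] not in shu:
--                     sum=sum+atom[protein[i]]
--                 else:
--                     s_tr=''
--                     for j in protein[i+1:]: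
--                         if j in shu:
--                             s_tr=s_tr+j
--                         else:
--                             break
--                     sum+=atom[protein[i]]*int(s_tr)
--     return sum
-- ===== SOURCE B (Python) =====
-- def molecularWeight(protein):
--     atom = {'O': 16, 'C': 12, 'H': 1, 'N': 14, 'S': 32}
--     # Single pass from the END: carry the pending run of digits seen so far;
--     # a letter consumes it, anything else discards it. No lookahead, no inner scan.
--     total = 0
--     buf = ''
--     for c in reversed(protein):
--         if '0' <= c <= '9':
--             buf = c + buf
--         elif 'A' <= c <= 'Z':
--             total += atom[c] * (int(buf) if buf else 1)
--             buf = ''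
--         else:
--             buf = ''
--     return total
-- ===== Notes on version B (the rewrite author's own statement) =====
-- stated objective: alternative
-- what changed: B scans the formula once RIGHT-TO-LEFT carrying a pending digit buffer that a letter consumes (atom[c]*(int(buf) if buf else 1)) and any other character discards, replacing A's left-to-right index walk with its lookahead test and nested digit-run rescan at every letter.
import Mathlib
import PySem

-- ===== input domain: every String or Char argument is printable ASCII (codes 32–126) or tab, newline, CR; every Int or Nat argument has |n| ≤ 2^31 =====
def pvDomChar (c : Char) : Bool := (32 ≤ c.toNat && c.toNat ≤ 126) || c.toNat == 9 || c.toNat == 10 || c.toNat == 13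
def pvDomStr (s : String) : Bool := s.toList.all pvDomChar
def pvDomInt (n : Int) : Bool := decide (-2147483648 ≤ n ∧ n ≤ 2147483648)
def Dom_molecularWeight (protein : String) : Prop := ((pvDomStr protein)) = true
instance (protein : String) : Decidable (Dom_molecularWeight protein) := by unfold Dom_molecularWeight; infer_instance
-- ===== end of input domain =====

-- B scans once right-to-left with a pending digit buffer (no lookahead, no inner rescan); same cost, different algorithmic organisation.

-- shared primitives (the identical dict literal and int() both Pythons use)
def pvAtom : PySem.Dict Char Int := PySem.Dict.ofList [('O',16),('C',12),('H',1),('N',14),('S',32)]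
-- atom[c]; Python raises KeyError on a missing key — Pre_ excludes those inputs, the 0 default is never read there
def pvAtomGet (c : Char) : Int := (pvAtom.getD c 0)
-- int(s) on a nonempty digit string; the 0 default is never read (ofChars? is some on such strings)
def pvIntDigits (ds : List Char) : Int := (PySem.Int.ofChars? ds).getD 0

-- ===== PORT A =====
-- inner loop "for j in protein[i+1:]: if j in shu: s_tr += j else: break"; 'j in shu' is exactly Char.isDigit on ASCII
def pvStrA : List Char → List Char
  | [] => []
  | j :: rest => if j.isDigit then j :: pvStrA rest else []

-- "for i in range(len(protein))": head = protein[i], tail = protein[i+1:]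
def pvLoopA : List Char → Int → Int
  | [], s => s
  | c :: rest, s =>
    if 'A' ≤ c ∧ c ≤ 'Z' then
      match rest with
      | [] => s + pvAtomGet c                                   -- i == len-1
      | d :: _ =>
        if ¬ d.isDigit then pvLoopA rest (s + pvAtomGet c)      -- protein[i+1] not in shu
        else pvLoopA rest (s + pvAtomGet c * pvIntDigits (pvStrA rest))
    else pvLoopA rest s

def molecularWeight (protein : String) : Int := pvLoopA protein.toList 0

-- ===== PORT B =====
-- loop body of Source B; state = (total, buf)
def pvStepB (st : Int × List Char) (c : Char) : Int × List Char :=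
  if '0' ≤ c ∧ c ≤ '9' then (st.1, c :: st.2)
  else if 'A' ≤ c ∧ c ≤ 'Z' then
    (st.1 + pvAtomGet c * (if st.2 = [] then (1 : Int) else pvIntDigits st.2), [])
  else (st.1, [])

-- "for c in reversed(protein): …" then return total
def molecularWeight_alt (protein : String) : Int :=
  (protein.toList.reverse.foldl pvStepB (0, [])).1

-- ===== PRECONDITION & SPEC =====
-- Pre_ excludes exactly the strings containing an uppercase letter outside OCHNS, on which Python A raises KeyError.
def Pre_molecularWeight (protein : String) : Prop :=
  (protein.toList.all (fun c => !(decide ('A' ≤ c) && decide (c ≤ 'Z')) || ['O','C','H','N','S'].contains c)) = true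
instance (protein : String) : Decidable (Pre_molecularWeight protein) := by
  unfold Pre_molecularWeight; infer_instance

def pvWitness_molecularWeight : String := "C6H12O6"

def Spec_molecularWeight (protein : String) (out : Int) : Prop := out = molecularWeight_alt protein
instance (protein : String) (out : Int) : Decidable (Spec_molecularWeight protein out) := by unfold Spec_molecularWeight; infer_instance

-- ===== CLAIM =====
def Claim_equal_molecularWeight : Prop := ∀ (protein : String), Dom_molecularWeight protein → Pre_molecularWeight protein → Spec_molecularWeight protein (molecularWeight protein)

-- ===== LEMMAS AND PROOFS =====

-- B's reversed foldl is a foldr over the original character list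
def pvFoldB (l : List Char) : Int × List Char := l.foldr (fun c st => pvStepB st c) (0, [])

lemma pvAlt_eq_foldr (protein : String) :
    molecularWeight_alt protein = (pvFoldB protein.toList).1 := by
  unfold molecularWeight_alt pvFoldB
  rw [List.foldl_reverse]

-- a digit is not an uppercase letter
lemma pv_digit_not_upper {d : Char} (h : d.isDigit = true) : ¬ ('A' ≤ d ∧ d ≤ 'Z') := by
  rintro ⟨h1, h2⟩
  simp [Char.isDigit, decide_eq_true_eq, Char.le_def, UInt32.le_iff_toNat_le] at h h1 h2
  omega

-- '0' ≤ c ≤ '9' is Char.isDigit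
lemma pv_digit_iff (c : Char) : ('0' ≤ c ∧ c ≤ '9') ↔ c.isDigit = true := by
  simp [Char.isDigit, decide_eq_true_eq, Char.le_def, UInt32.le_iff_toNat_le]

-- A's hand-rolled digit collector is takeWhile
lemma pvStrA_eq_takeWhile (l : List Char) : pvStrA l = l.takeWhile Char.isDigit := by
  induction l with
  | nil => rfl
  | cons j rest ih =>
    by_cases h : j.isDigit
    · simp [pvStrA, List.takeWhile, h, ih]
    · simp [pvStrA, List.takeWhile, h]

-- main invariant: B's buffer is the leading digit run, and A's loop adds B's total to its accumulator
lemma pv_main (l : List Char) :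
    (pvFoldB l).2 = l.takeWhile Char.isDigit ∧ ∀ s : Int, pvLoopA l s = s + (pvFoldB l).1 := by
  induction l with
  | nil => exact ⟨rfl, fun s => by simp [pvLoopA, pvFoldB]⟩
  | cons c rest ih =>
    obtain ⟨ihbuf, ihsum⟩ := ih
    have hstep : pvFoldB (c :: rest) = pvStepB (pvFoldB rest) c := rfl
    by_cases hd : c.isDigit
    · -- digit: buffer grows, total unchanged; A skips (a digit is not uppercase)
      have hnu := pv_digit_not_upper hd
      have hdc : ('0' ≤ c ∧ c ≤ '9') := (pv_digit_iff c).mpr hd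
      constructor
      · rw [hstep]; simp [pvStepB, hdc, List.takeWhile, hd, ihbuf]
      · intro s
        rw [hstep]; simp [pvLoopA, hnu, pvStepB, hdc, ihsum s]
    · by_cases hup : 'A' ≤ c ∧ c ≤ 'Z'
      · -- letter: B consumes the buffer; A looks ahead / rescans the digit run
        have hdc : ¬ ('0' ≤ c ∧ c ≤ '9') := fun h => hd ((pv_digit_iff c).mp h)
        refine ⟨by rw [hstep]; simp [pvStepB, hdc, hup, List.takeWhile, hd], ?_⟩
        intro s
        rw [hstep]
        cases rest with
        | nil =>
          simp [pvLoopA, hup, pvStepB, hdc, pvFoldB]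
        | cons d t =>
          by_cases hdd : d.isDigit
          · have hbuf : (pvFoldB (d :: t)).2 ≠ [] := by
              rw [ihbuf]; simp [List.takeWhile, hdd]
            rw [show pvLoopA (c :: d :: t) s
                  = pvLoopA (d :: t) (s + pvAtomGet c * pvIntDigits (pvStrA (d :: t))) by
                  simp [pvLoopA, hup, hdd]]
            rw [ihsum]
            simp only [pvStepB, if_neg hdc, if_pos hup, if_neg hbuf]
            rw [pvStrA_eq_takeWhile, ← ihbuf]
            ring
          · have hbuf : (pvFoldB (d :: t)).2 = [] := by
              rw [ihbuf]; simp [List.takeWhile, hdd]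
            rw [show pvLoopA (c :: d :: t) s = pvLoopA (d :: t) (s + pvAtomGet c) by
                  simp [pvLoopA, hup, hdd]]
            rw [ihsum, pvStepB, if_neg hdc, if_pos hup, hbuf]
            simp; ring
      · -- other character: B discards the buffer; A skips
        have hdc : ¬ ('0' ≤ c ∧ c ≤ '9') := fun h => hd ((pv_digit_iff c).mp h)
        refine ⟨by rw [hstep]; simp [pvStepB, hdc, hup, List.takeWhile, hd], ?_⟩
        intro s
        rw [hstep]; simp [pvLoopA, hup, pvStepB, hdc, ihsum s]

-- ===== VERDICT =====
theorem molecularWeight_spec : Claim_equal_molecularWeight := by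
  intro protein _ _
  unfold Spec_molecularWeight molecularWeight
  rw [pvAlt_eq_foldr]
  simpa using (pv_main protein.toList).2 0
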